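-- pv_equiv track=rewrite | github.com/JamesPriest/AOC | 2023/D07/soln.py | replace_jokers
-- ===== SOURCE A (Python) =====
-- def replace_jokers(hand_str, replacement_str):
--     """
--     So basically it's a string substitution however the replacement
--     keys aren't uniform and the locations aren't uniform. It creates a
--     new string by scanning across the string and replacing what the
--     current index of replacement is.
--
--     It's cursed and if I can be smarter about this, I all ears.
--     """
--     idx = 0
--     out_str = ""
--     for i in hand_str:
--         if i == "J":
--             out_str += replacement_str[idx]
--             idx += 1
--         else:
--             out_str += i
--     return out_str
-- ===== SOURCE B (Python) =====
-- def replace_jokers(hand_str, replacement_str):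
--     segments = hand_str.split("J")
--     out = segments[0]
--     for i in range(1, len(segments)):
--         out += replacement_str[i - 1] + segments[i]
--     return out
-- ===== Notes on version B (the rewrite author's own statement) =====
-- stated objective: faster
-- what changed: B splits the hand at every 'J' once and reassembles the segments interleaved with successive replacement characters, instead of scanning character by character with a running replacement index.
import Mathlib
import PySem

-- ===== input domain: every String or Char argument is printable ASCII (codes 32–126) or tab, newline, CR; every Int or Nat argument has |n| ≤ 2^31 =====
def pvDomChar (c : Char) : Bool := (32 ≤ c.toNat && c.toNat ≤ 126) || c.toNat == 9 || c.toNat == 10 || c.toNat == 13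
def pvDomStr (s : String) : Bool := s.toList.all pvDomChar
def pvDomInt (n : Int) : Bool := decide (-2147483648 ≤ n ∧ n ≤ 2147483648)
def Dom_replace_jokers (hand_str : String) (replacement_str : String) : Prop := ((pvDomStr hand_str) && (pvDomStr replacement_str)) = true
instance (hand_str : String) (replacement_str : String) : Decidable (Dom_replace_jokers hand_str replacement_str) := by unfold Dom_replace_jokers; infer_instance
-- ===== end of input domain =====

-- B splits the hand at every 'J' once and reassembles the segments interleaved with
-- successive replacement characters, instead of A's char-by-char scan with a running index.


-- ===== PORT A =====
-- one step of A's for-loop: state = some (idx, out_str); `none` marks the IndexError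
-- raised by `replacement_str[idx]` (those inputs are excluded by Pre_).
def aStep (replacement_str : String) (st : Option (Nat × List Char)) (i : Char) :
    Option (Nat × List Char) :=
  match st with
  | none => none
  | some (idx, out) =>
    if i = 'J' then
      match PySem.Str.pyGet? replacement_str (idx : Int) with
      | none => none
      | some c => some (idx + 1, out ++ [c])
    else some (idx, out ++ [i])

def replace_jokers (hand_str : String) (replacement_str : String) : String :=
  match hand_str.toList.foldl (aStep replacement_str) (some (0, [])) with
  | none => ""          -- IndexError: unreachable under Pre_
  | some (_, out) => String.ofList out

-- ===== PORT B =====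
-- assemble replacement_str[k] ++ seg for each remaining segment, indexing lazily;
-- `none` marks the IndexError (excluded by Pre_).
def altGo (repl : List Char) (k : Nat) (segs : List (List Char)) : Option (List Char) :=
  match segs with
  | [] => some []
  | s :: rest =>
    match PySem.List.pyGet? repl (k : Int) with
    | none => none
    | some c =>
      match altGo repl (k + 1) rest with
      | none => none
      | some t => some (c :: (s ++ t))

def replace_jokers_alt (hand_str : String) (replacement_str : String) : String :=
  match hand_str.toList.splitOn 'J' with    -- hand_str.split("J"): single-char separator
  | [] => ""                                 -- unreachable: split never returns []
  | s0 :: rest =>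
    match altGo replacement_str.toList 0 rest with
    | none => ""                             -- IndexError: unreachable under Pre_
    | some t => String.ofList (s0 ++ t)

-- ===== PRECONDITION & SPEC =====
-- A raises IndexError iff hand_str has more 'J's than replacement_str has characters.
def Pre_replace_jokers (hand_str : String) (replacement_str : String) : Prop :=
  hand_str.toList.count 'J' ≤ replacement_str.toList.length
instance (hand_str : String) (replacement_str : String) : Decidable (Pre_replace_jokers hand_str replacement_str) := by unfold Pre_replace_jokers; infer_instance
def pvWitness_replace_jokers : String × String := ("JA2J", "xy")

def Spec_replace_jokers (hand_str : String) (replacement_str : String) (out : String) : Prop := out = replace_jokers_alt hand_str replacement_str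
instance (hand_str : String) (replacement_str : String) (out : String) : Decidable (Spec_replace_jokers hand_str replacement_str out) := by unfold Spec_replace_jokers; infer_instance

-- ===== CLAIM (what is proved, stated in full; the proofs are below) =====
def Claim_equal_replace_jokers : Prop := ∀ (hand_str : String) (replacement_str : String), Dom_replace_jokers hand_str replacement_str → Pre_replace_jokers hand_str replacement_str → Spec_replace_jokers hand_str replacement_str (replace_jokers hand_str replacement_str)

-- ===== LEMMAS AND PROOFS =====

-- common reference recursion both ports are reduced to
def jspec (repl : List Char) : List Char → Nat → Option (List Char)
  | [], _ => some []
  | c :: t, k =>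
    if c = 'J' then
      (PySem.List.pyGet? repl (k : Int)).bind fun ch =>
        (jspec repl t (k + 1)).map (ch :: ·)
    else
      (jspec repl t k).map (c :: ·)

theorem aStep_none (repl : String) (cs : List Char) :
    cs.foldl (aStep repl) none = none := by
  induction cs with
  | nil => rfl
  | cons c t ih => simpa [aStep] using ih

theorem foldl_aStep_eq (repl : String) (cs : List Char) :
    ∀ (k : Nat) (out : List Char),
      cs.foldl (aStep repl) (some (k, out)) =
        (jspec repl.toList cs k).map (fun r => (k + cs.count 'J', out ++ r)) := by
  induction cs with
  | nil => intro k out; simp [jspec]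
  | cons c t ih =>
    intro k out
    by_cases hc : c = 'J'
    · subst hc
      simp only [List.foldl_cons, aStep, jspec, PySem.Str.pyGet?,
        PySem.Chars.pyGet?_eq_listPyGet?]
      cases h : PySem.List.pyGet? repl.toList (k : Int) with
      | none => simp [aStep_none]
      | some ch =>
        simp only [if_pos trivial, Option.bind_some]
        rw [ih (k + 1) (out ++ [ch])]
        cases jspec repl.toList t (k + 1) <;> simp <;> omega
    · simp only [List.foldl_cons, aStep, if_neg hc, jspec]
      rw [ih k (out ++ [c])]
      cases jspec repl.toList t k <;> simp [hc]

theorem splitOn_jspec (repl : List Char) (cs : List Char) :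
    ∀ (k : Nat),
      jspec repl cs k =
        (altGo repl k (cs.splitOn 'J').tail).map ((cs.splitOn 'J').headI ++ ·) := by
  induction cs with
  | nil => intro k; simp [jspec, altGo, List.splitOn, List.splitOnP_nil]
  | cons c t ih =>
    intro k
    have hne : t.splitOn 'J' ≠ [] := List.splitOnP_ne_nil _ t
    obtain ⟨s0, rest, hsplit⟩ : ∃ s0 rest, t.splitOn 'J' = s0 :: rest := by
      cases h : t.splitOn 'J' with
      | nil => exact absurd h hne
      | cons a b => exact ⟨a, b, rfl⟩
    by_cases hc : c = 'J'
    · subst hc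
      have h1 : (('J' :: t).splitOn 'J') = [] :: t.splitOn 'J' := by
        simp [List.splitOn, List.splitOnP_cons]
      rw [h1, hsplit]
      simp only [jspec, List.tail_cons, List.headI_cons, altGo,
        if_pos trivial]
      rw [ih (k + 1), hsplit]
      cases PySem.List.pyGet? repl (k : Int) with
      | none => simp
      | some ch =>
        cases h2 : altGo repl (k + 1) rest <;> simp [h2]
    · have h1 : ((c :: t).splitOn 'J') = (c :: s0) :: rest := by
        simp [List.splitOn, List.splitOnP_cons, hc, List.splitOn] at hsplit ⊢
        rw [hsplit]; rfl
      rw [h1]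
      simp only [jspec, if_neg hc, List.tail_cons, List.headI_cons, ih k, hsplit]
      cases altGo repl k rest <;> simp

theorem ports_agree (hand repl : String) :
    replace_jokers hand repl = replace_jokers_alt hand repl := by
  unfold replace_jokers replace_jokers_alt
  have hne : hand.toList.splitOn 'J' ≠ [] := List.splitOnP_ne_nil _ _
  obtain ⟨s0, rest, hsplit⟩ : ∃ s0 rest, hand.toList.splitOn 'J' = s0 :: rest := by
    cases h : hand.toList.splitOn 'J' with
    | nil => exact absurd h hne
    | cons a b => exact ⟨a, b, rfl⟩
  rw [foldl_aStep_eq repl hand.toList 0 [], splitOn_jspec repl.toList hand.toList 0,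
    hsplit]
  simp only [List.tail_cons, List.headI_cons]
  cases altGo repl.toList 0 rest <;> simp

-- ===== VERDICT (by name: the statement is the Claim_ definition above) =====
theorem replace_jokers_spec : Claim_equal_replace_jokers := by
  intro hand repl _ _
  unfold Spec_replace_jokers
  exact ports_agree hand repl
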